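-- pv_equiv track=rewrite | github.com/un4rch/MineriaDeSuicidios | soloprepdatos.py | eliminarSignosPuntuacion
-- ===== SOURCE A (Python) =====
-- def eliminarSignosPuntuacion(texto):  # dado un string, devuelve el mismo string eliminando todos los caracteres que no sean alfabéticos
--         textoNuevo = ""
--         for caracter in texto:  # por cada caracter en el texto
--             if caracter == "_":  # si es una barra baja, entonces se traduce como espacio
--                 textoNuevo = textoNuevo + " "
--             if caracter.isalpha() or caracter == " ":  # si pertenece al conjunto de letras del alfabeto, se engancha a "textoNuevo"
--                 textoNuevo = textoNuevo + caracter
--         return(textoNuevo)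
-- ===== SOURCE B (Python) =====
-- def eliminarSignosPuntuacion(texto):
--     table = {ord(c): (' ' if c == '_' else (c if (c.isalpha() or c == ' ') else None))
--              for c in set(texto)}
--     return texto.translate(table)
-- ===== Notes on version B (the rewrite author's own statement) =====
-- stated objective: idiomatic
-- what changed: Replaces the fused per-character if/append loop by building a translation table over the distinct characters (underscore->space, alpha/space->itself, else delete) and doing one str.translate pass.
import Mathlib
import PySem

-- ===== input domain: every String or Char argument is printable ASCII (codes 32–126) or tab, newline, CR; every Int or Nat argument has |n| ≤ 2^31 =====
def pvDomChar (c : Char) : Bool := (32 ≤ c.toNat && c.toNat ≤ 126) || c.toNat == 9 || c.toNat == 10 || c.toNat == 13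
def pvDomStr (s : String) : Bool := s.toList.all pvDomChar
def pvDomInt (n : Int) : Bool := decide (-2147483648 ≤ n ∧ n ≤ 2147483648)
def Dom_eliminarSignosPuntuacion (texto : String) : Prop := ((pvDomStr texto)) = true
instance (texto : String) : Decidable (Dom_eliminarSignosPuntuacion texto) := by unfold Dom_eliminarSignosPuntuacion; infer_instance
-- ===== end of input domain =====

-- B builds a translation table over the distinct characters and translates in one pass; same return value as A's fused loop.
-- ===== PORT A =====
def eliminarSignosPuntuacion (texto : String) : String :=
  String.ofList (texto.toList.foldl (fun acc c =>
    let acc1 := if c = '_' then acc ++ [' '] else acc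
    if PySem.Chars.isalpha c || c = ' ' then acc1 ++ [c] else acc1) [])

-- ===== PORT B =====
-- the dict comprehension over set(texto); keyed by the char itself (ord is injective on chars)
def pvTabla (texto : String) : PySem.Dict Char (Option Char) :=
  (PySem.Set.ofList texto.toList).foldl
    (fun d c => d.insert c
      (if c = '_' then some ' '
       else if PySem.Chars.isalpha c || c = ' ' then some c else none))
    PySem.Dict.empty

-- texto.translate(table): missing key keeps the char, None deletes, a char maps
def eliminarSignosPuntuacion_alt (texto : String) : String :=
  String.ofList (texto.toList.foldl (fun acc c =>
    match (pvTabla texto).get? c with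
    | none => acc ++ [c]
    | some none => acc
    | some (some d) => acc ++ [d]) [])

-- ===== PRECONDITION & SPEC =====
def Spec_eliminarSignosPuntuacion (texto : String) (out : String) : Prop := out = eliminarSignosPuntuacion_alt texto
instance (texto : String) (out : String) : Decidable (Spec_eliminarSignosPuntuacion texto out) := by unfold Spec_eliminarSignosPuntuacion; infer_instance

-- ===== CLAIM (what is proved, stated in full; the proofs are below) =====
def Claim_equal_eliminarSignosPuntuacion : Prop := ∀ (texto : String), Dom_eliminarSignosPuntuacion texto → Spec_eliminarSignosPuntuacion texto (eliminarSignosPuntuacion texto)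

-- ===== LEMMAS AND PROOFS =====

-- the table's translation rule, as a function of the character
def pvRegla (c : Char) : Option Char :=
  if c = '_' then some ' '
  else if PySem.Chars.isalpha c || c = ' ' then some c else none

-- a fold of inserts whose value depends only on the key: lookup of a covered key gives the rule
theorem pv_get_foldl_insert (l : List Char) (d : PySem.Dict Char (Option Char)) (k : Char)
    (hk : k ∈ l ∨ d.get? k = some (pvRegla k)) :
    (l.foldl (fun d c => d.insert c (pvRegla c)) d).get? k = some (pvRegla k) := by
  induction l generalizing d with
  | nil => simpa using hk.resolve_left (by simp)
  | cons c t ih =>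
    simp only [List.foldl_cons]
    apply ih
    rcases hk with hk | hk
    · rcases List.mem_cons.mp hk with rfl | hmem
      · right; rw [PySem.Dict.get?_insert_self]
      · exact Or.inl hmem
    · by_cases h : k = c
      · subst h; right; rw [PySem.Dict.get?_insert_self]
      · right; rw [PySem.Dict.get?_insert_of_ne (hne := h)]; exact hk

theorem pv_tabla_get (texto : String) (c : Char) (hc : c ∈ texto.toList) :
    (pvTabla texto).get? c = some (pvRegla c) := by
  unfold pvTabla
  have : (fun (d : PySem.Dict Char (Option Char)) c => d.insert c
      (if c = '_' then some ' '
       else if PySem.Chars.isalpha c || c = ' ' then some c else none))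
      = fun d c => d.insert c (pvRegla c) := by
    funext d c; rfl
  rw [this]
  exact pv_get_foldl_insert _ _ _ (Or.inl ((PySem.Set.mem_ofList _ _).mpr hc))

-- ===== VERDICT (by name: the statement is the Claim_ definition above) =====
theorem eliminarSignosPuntuacion_spec : Claim_equal_eliminarSignosPuntuacion := by
  intro texto _
  unfold Spec_eliminarSignosPuntuacion eliminarSignosPuntuacion eliminarSignosPuntuacion_alt
  congr 1
  apply PySem.List.foldl_congr_mem
  intro acc c hc
  rw [pv_tabla_get texto c hc]
  unfold pvRegla
  by_cases h1 : c = '_'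
  · subst h1; simp [PySem.Chars.isalpha]; decide
  · by_cases h2 : PySem.Chars.isalpha c || c = ' '
    · simp [h1, h2]
    · simp [h1, h2]
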